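-- pv_equiv track=rewrite | github.com/paiml/depyler | examples/test_performance_warnings.py | aggregate_row_sum
-- ===== SOURCE A (Python) =====
-- from typing import List
--
-- def aggregate_row_sum(matrix: List[int], rows: int, cols: int) -> int:
--     """Computing row sums in nested loop."""
--     result: int = 0
--     r: int = 0
--     while r < rows:
--         row_sum: int = 0
--         c: int = 0
--         while c < cols:
--             idx: int = r * cols + c
--             if idx < len(matrix):
--                 row_sum = row_sum + matrix[idx]
--             c = c + 1
--         c = 0
--         while c < cols:
--             idx2: int = r * cols + c
--             if idx2 < len(matrix):
--                 result = result + matrix[idx2] * row_sum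
--             c = c + 1
--         r = r + 1
--     return result
-- ===== SOURCE B (Python) =====
-- def aggregate_row_sum(matrix, rows, cols):
--     """Sum of squared row sums via slicing: each row is the slice matrix[r*cols:(r+1)*cols]
--     (slicing clips at the end exactly like A's index guard); degenerate dims give 0 up front."""
--     if rows <= 0 or cols <= 0:
--         return 0
--     result = 0
--     for r in range(rows):
--         s = sum(matrix[r * cols:(r + 1) * cols])
--         result += s * s
--     return result
-- ===== Notes on version B (the rewrite author's own statement) =====
-- stated objective: faster
-- what changed: A's two guarded index loops per row are replaced by one list slice per row (slicing clips at the end exactly like A's index guard) summed once and squared, with an early return 0 for non-positive rows/cols.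
import Mathlib
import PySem

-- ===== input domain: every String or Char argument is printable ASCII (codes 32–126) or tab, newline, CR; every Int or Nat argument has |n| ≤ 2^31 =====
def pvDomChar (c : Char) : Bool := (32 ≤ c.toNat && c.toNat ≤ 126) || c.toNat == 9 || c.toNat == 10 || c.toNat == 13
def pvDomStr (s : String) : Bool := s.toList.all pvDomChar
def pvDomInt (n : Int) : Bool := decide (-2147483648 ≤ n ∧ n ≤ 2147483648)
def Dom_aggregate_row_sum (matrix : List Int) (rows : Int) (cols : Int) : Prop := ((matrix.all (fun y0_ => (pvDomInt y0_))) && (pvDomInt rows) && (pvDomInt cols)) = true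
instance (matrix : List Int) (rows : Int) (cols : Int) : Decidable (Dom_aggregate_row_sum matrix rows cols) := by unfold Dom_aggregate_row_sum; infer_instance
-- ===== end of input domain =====

-- B replaces A's two guarded index loops per row with one list slice per row, summed once and squared; degenerate (non-positive) dims return 0 up front.


-- ===== PORT A =====
-- 'while r < rows' starting at r = 0 with r += 1 is the loop over PySem.List.pyRange 0 rows 1;
-- idx is generated nonnegative and guarded by idx < len(matrix), so matrix[idx] = matrix.getD idx.toNat 0 exactly.
def aggregate_row_sum (matrix : List Int) (rows : Int) (cols : Int) : Int :=
  (PySem.List.pyRange 0 rows 1).foldl (fun result r =>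
    let row_sum : Int :=
      (PySem.List.pyRange 0 cols 1).foldl (fun row_sum c =>
        let idx : Int := r * cols + c
        if idx < (matrix.length : Int) then row_sum + matrix.getD idx.toNat 0 else row_sum) 0
    (PySem.List.pyRange 0 cols 1).foldl (fun result c =>
      let idx2 : Int := r * cols + c
      if idx2 < (matrix.length : Int) then result + matrix.getD idx2.toNat 0 * row_sum else result) result) 0

-- ===== PORT B =====
-- 'matrix[r*cols:(r+1)*cols]' is PySem.List.slice; 'sum(...)' is List.sum.
def aggregate_row_sum_alt (matrix : List Int) (rows : Int) (cols : Int) : Int :=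
  if rows ≤ 0 ∨ cols ≤ 0 then 0
  else
    (PySem.List.pyRange 0 rows 1).foldl (fun result r =>
      let s : Int := (PySem.List.slice matrix (some (r * cols)) (some ((r + 1) * cols))).sum
      result + s * s) 0

-- ===== PRECONDITION & SPEC =====
def Spec_aggregate_row_sum (matrix : List Int) (rows : Int) (cols : Int) (out : Int) : Prop := out = aggregate_row_sum_alt matrix rows cols
instance (matrix : List Int) (rows : Int) (cols : Int) (out : Int) : Decidable (Spec_aggregate_row_sum matrix rows cols out) := by unfold Spec_aggregate_row_sum; infer_instance

-- ===== CLAIM (what is proved, stated in full; the proofs are below) =====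
def Claim_equal_aggregate_row_sum : Prop := ∀ (matrix : List Int) (rows : Int) (cols : Int), Dom_aggregate_row_sum matrix rows cols → Spec_aggregate_row_sum matrix rows cols (aggregate_row_sum matrix rows cols)

-- ===== LEMMAS AND PROOFS =====

-- an additive fold from x is x plus the sum of the pointwise contributions
lemma foldl_add_map (l : List Int) (f : Int → Int) (x : Int) :
    l.foldl (fun s c => s + f c) x = x + (l.map f).sum := by
  induction l generalizing x with
  | nil => simp
  | cons c l ih => simp [List.foldl_cons, ih, add_assoc]

-- a guarded additive fold is an additive fold of the guarded contributions
lemma foldl_if_eq_foldl_add (l : List Int) (g : Int → Int) (P : Int → Prop) [DecidablePred P] (x : Int) :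
    l.foldl (fun s c => if P c then s + g c else s) x
      = l.foldl (fun s c => s + (if P c then g c else 0)) x := by
  apply PySem.List.foldl_congr_mem
  intro s c _
  split <;> simp

-- a truncated prefix sum, written as a sum of defaulted lookups
lemma sum_take_eq_sum_getD (l : List Int) (t : Nat) :
    (l.take t).sum = ((List.range t).map (fun k => l.getD k 0)).sum := by
  induction t generalizing l with
  | zero => simp
  | succ t ih =>
    cases l with
    | nil => simp [List.getD]
    | cons a l =>
      rw [List.take_succ_cons, List.sum_cons, ih l, List.range_succ_eq_map, List.map_cons,
          List.map_map]
      simp only [List.sum_cons]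
      congr 1

-- A's guarded row sum equals the sum of B's slice, for 0 ≤ a
lemma guarded_sum_eq_slice_sum (matrix : List Int) (cols a : Int) (ha : 0 ≤ a) (hc : 0 < cols) :
    ((PySem.List.pyRange 0 cols 1).map
        (fun c => if a + c < (matrix.length : Int) then matrix.getD (a + c).toNat 0 else 0)).sum
      = (PySem.List.slice matrix (some a) (some (a + cols))).sum := by
  rw [PySem.List.slice_toNat matrix ha (by omega), PySem.List.pyRange_one 0 cols]
  have htn : (a + cols).toNat - a.toNat = cols.toNat := by omega
  rw [htn, sum_take_eq_sum_getD (matrix.drop a.toNat) cols.toNat]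
  rw [List.map_map, show cols - 0 = cols from by ring]
  congr 1
  apply List.map_congr_left
  intro k hk
  simp only [Function.comp]
  have hk' : k < cols.toNat := List.mem_range.mp hk
  by_cases hlt : 0 + (k : Int) + a < (matrix.length : Int)
  · have hlt' : a + (0 + (k : Int)) < (matrix.length : Int) := by omega
    rw [if_pos hlt']
    have htn2 : (a + (0 + (k : Int))).toNat = a.toNat + k := by omega
    rw [htn2]
    rcases Nat.lt_or_ge (a.toNat + k) matrix.length with h | h
    · rw [List.getD_eq_getElem _ _ (by simpa using h),
          List.getD_eq_getElem _ _ (by simp; omega)]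
      simp [List.getElem_drop]
    · omega
  · have hlt' : ¬ a + (0 + (k : Int)) < (matrix.length : Int) := by omega
    rw [if_neg hlt']
    rw [List.getD_eq_default]
    simp
    omega

-- A's per-row update equals B's per-row update (0 ≤ r, so a = r*cols ≥ 0 when 0 < cols)
lemma row_step_eq (matrix : List Int) (cols : Int) (r result : Int) (hr : 0 ≤ r) (hc : 0 < cols) :
    (let row_sum : Int :=
      (PySem.List.pyRange 0 cols 1).foldl (fun row_sum c =>
        let idx : Int := r * cols + c
        if idx < (matrix.length : Int) then row_sum + matrix.getD idx.toNat 0 else row_sum) 0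
     (PySem.List.pyRange 0 cols 1).foldl (fun result c =>
        let idx2 : Int := r * cols + c
        if idx2 < (matrix.length : Int) then result + matrix.getD idx2.toNat 0 * row_sum else result) result)
    = result + (PySem.List.slice matrix (some (r * cols)) (some ((r + 1) * cols))).sum
             * (PySem.List.slice matrix (some (r * cols)) (some ((r + 1) * cols))).sum := by
  have ha : (0:Int) ≤ r * cols := mul_nonneg hr hc.le
  have hsum : ((PySem.List.pyRange 0 cols 1).map
      (fun c => if r * cols + c < (matrix.length : Int) then matrix.getD (r * cols + c).toNat 0 else 0)).sum
      = (PySem.List.slice matrix (some (r * cols)) (some ((r + 1) * cols))).sum := by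
    have hslice : (r + 1) * cols = r * cols + cols := by ring
    rw [hslice]
    exact guarded_sum_eq_slice_sum matrix cols (r * cols) ha hc
  simp only []
  have h1 : (PySem.List.pyRange 0 cols 1).foldl (fun row_sum c =>
        if r * cols + c < (matrix.length : Int) then row_sum + matrix.getD (r * cols + c).toNat 0 else row_sum) 0
      = (PySem.List.slice matrix (some (r * cols)) (some ((r + 1) * cols))).sum := by
    rw [foldl_if_eq_foldl_add _ (fun c => matrix.getD (r * cols + c).toNat 0)
        (fun c => r * cols + c < (matrix.length : Int)) 0, foldl_add_map, zero_add]
    exact hsum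
  rw [h1]
  set S := (PySem.List.slice matrix (some (r * cols)) (some ((r + 1) * cols))).sum with hS
  rw [foldl_if_eq_foldl_add _ (fun c => matrix.getD (r * cols + c).toNat 0 * S)
      (fun c => r * cols + c < (matrix.length : Int)) result, foldl_add_map]
  congr 1
  have hmul : ((PySem.List.pyRange 0 cols 1).map
        (fun c => if r * cols + c < (matrix.length : Int) then matrix.getD (r * cols + c).toNat 0 * S else 0))
      = ((PySem.List.pyRange 0 cols 1).map
        (fun c => (if r * cols + c < (matrix.length : Int) then matrix.getD (r * cols + c).toNat 0 else 0) * S)) := by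
    apply List.map_congr_left; intro c _; split <;> simp
  rw [hmul, List.sum_map_mul_right, hsum]

-- a fold whose step ignores its arguments returns its initial value
lemma foldl_const_int (f : Int → Int → Int) (h : ∀ x a, f x a = x) (l : List Int) (b : Int) :
    l.foldl f b = b := by
  induction l generalizing b with
  | nil => rfl
  | cons a l ih => rw [List.foldl_cons, h]; exact ih b

-- ===== VERDICT (by name: the statement is the Claim_ definition above) =====
theorem aggregate_row_sum_spec : Claim_equal_aggregate_row_sum := by
  intro matrix rows cols _
  unfold Spec_aggregate_row_sum aggregate_row_sum aggregate_row_sum_alt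
  by_cases hdeg : rows ≤ 0 ∨ cols ≤ 0
  · rw [if_pos hdeg]
    rcases hdeg with h | h
    · rw [PySem.List.pyRange_one_eq_nil h]; rfl
    · apply foldl_const_int
      intro x a
      simp [PySem.List.pyRange_one_eq_nil h]
  · rw [if_neg hdeg]
    rw [not_or, not_le, not_le] at hdeg
    apply PySem.List.foldl_congr_mem
    intro result r hrmem
    have hr : 0 ≤ r := (PySem.List.mem_pyRange_one.mp hrmem).1
    exact row_step_eq matrix cols r result hr hdeg.2
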